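-- pv_equiv track=rewrite | github.com/4rund3v/DATA-STRUCTURE-ALGORITHM | 12. Back Tracking/01. Permutation Pattern/05. N digit in a incresing order.py | increasingNumber
-- ===== SOURCE A (Python) =====
-- def increasingNumber(n):
--     res = []
--
--     # Handle n = 1 case explicitly
--     if n == 1:
--         res = [i for i in range(10)]  # Include 0 for single-digit numbers
--         return res
--
--     def solve(vec, n):
--         # Base case: if we've added n digits
--         if n == 0:
--             # Combine digits in vec to form a number
--             ans = 0
--             for digit in vec:
--                 ans = (ans * 10) + digit
--             res.append(ans)
--             return
--
--         # Recursive case: try adding each possible next digit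
--         for i in range(1, 10):
--             # Only add i if it's greater than the last digit in vec (if any)
--             if len(vec) == 0 or i > vec[-1]:
--                 vec.append(i)  # Add the digit
--                 solve(vec, n-1)  # Recurse with one less digit to add
--                 vec.pop()  # Backtrack: remove the digit we just added
--
--     # Start the recursion with an empty vector and n digits to add
--     solve([], n)
--     return res
-- ===== SOURCE B (Python) =====
-- def increasingNumber(n):
--     # Iterative breadth-first layers instead of backtracking recursion.
--     if n == 1:
--         return list(range(10))
--     if n < 0 or n > 9:
--         return []  # no strictly increasing number has more than 9 digits
--     nums = [(0, 0)]
--     for _ in range(n):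
--         nums = [(v * 10 + d, d) for v, last in nums for d in range(last + 1, 10)]
--     return [v for v, _ in nums]
-- ===== Notes on version B (the rewrite author's own statement) =====
-- stated objective: alternative
-- what changed: Replaced the mutable-vector backtracking recursion with an iterative breadth-first construction: starting from [(0, 0)], n list-comprehension passes extend each (value, last-digit) pair by every larger digit, yielding the same numbers in the same order; an explicit n > 9 guard returns [] since no strictly increasing number has more than 9 digits.
import Mathlib
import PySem

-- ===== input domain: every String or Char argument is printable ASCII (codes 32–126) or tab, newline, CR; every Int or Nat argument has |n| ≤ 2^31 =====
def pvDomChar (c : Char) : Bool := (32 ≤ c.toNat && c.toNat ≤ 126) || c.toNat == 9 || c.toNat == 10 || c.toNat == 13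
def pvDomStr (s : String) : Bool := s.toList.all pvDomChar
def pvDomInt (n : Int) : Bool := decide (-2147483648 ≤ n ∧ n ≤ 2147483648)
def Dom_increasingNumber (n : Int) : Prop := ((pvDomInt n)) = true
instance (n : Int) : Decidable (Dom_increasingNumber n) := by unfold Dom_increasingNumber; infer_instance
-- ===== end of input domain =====

-- B replaces the backtracking recursion by an iterative layer-by-layer (BFS) build of
-- (value, last-digit) pairs; same return value on every input, no speed claim.

-- ===== PORT A =====
-- 'ans = 0; for digit in vec: ans = ans*10 + digit'
def pvFoldDigits (vec : List Int) : Int := vec.foldl (fun a d => a * 10 + d) 0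

-- solve(vec, n) threading res; fuel = 10 - vec.length on every reachable call.  The fuel-0
-- branch is never taken on a reachable state: vec is always a strictly increasing list of
-- digits from 1..9, so at length 9 its last element is 9 and no i in range(1,10) passes
-- 'i > vec[-1]', exactly as in Python (whose recursion depth is bounded the same way).
def pvSolve (fuel : Nat) (vec : List Int) (n : Int) (res : List Int) : List Int :=
  match fuel with
  | 0 => res
  | fuel + 1 =>
    if n = 0 then res ++ [pvFoldDigits vec]
    else
      (PySem.List.pyRange 1 10 1).foldl
        (fun acc i =>
          if vec.length = 0 ∨ i > vec.getLastD 0 then pvSolve fuel (vec ++ [i]) (n - 1) acc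
          else acc)
        res

def increasingNumber (n : Int) : List Int :=
  if n = 1 then PySem.List.pyRange 0 10 1
  else pvSolve 10 [] n []

-- ===== PORT B =====
def increasingNumber_alt (n : Int) : List Int :=
  if n = 1 then PySem.List.pyRange 0 10 1
  else if n < 0 ∨ n > 9 then []
  else
    let nums := (List.range n.toNat).foldl
      (fun nums _ => nums.flatMap (fun p =>
        (PySem.List.pyRange (p.2 + 1) 10 1).map (fun d => (p.1 * 10 + d, d))))
      [((0 : Int), (0 : Int))]
    nums.map Prod.fst

-- ===== PRECONDITION & SPEC =====
def Spec_increasingNumber (n : Int) (out : List Int) : Prop := out = increasingNumber_alt n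
instance (n : Int) (out : List Int) : Decidable (Spec_increasingNumber n out) := by unfold Spec_increasingNumber; infer_instance

-- ===== CLAIM (what is proved, stated in full; the proofs are below) =====
def Claim_equal_increasingNumber : Prop := ∀ (n : Int), Dom_increasingNumber n → Spec_increasingNumber n (increasingNumber n)

-- ===== LEMMAS AND PROOFS =====

-- One expansion step of B: all one-digit extensions of a (value, last-digit) pair.
def pvStep (p : Int × Int) : List (Int × Int) :=
  (PySem.List.pyRange (p.2 + 1) 10 1).map (fun d => (p.1 * 10 + d, d))

-- k expansion steps.
def pvLayers : Nat → List (Int × Int) → List (Int × Int)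
  | 0, ps => ps
  | k + 1, ps => (pvLayers k ps).flatMap pvStep

theorem pvLayers_nil (k : Nat) : pvLayers k [] = [] := by
  induction k with
  | zero => rfl
  | succ k ih => simp [pvLayers, ih]

theorem pvLayers_append (k : Nat) : ∀ ps qs : List (Int × Int),
    pvLayers k (ps ++ qs) = pvLayers k ps ++ pvLayers k qs := by
  induction k with
  | zero => intro ps qs; rfl
  | succ k ih => intro ps qs; simp [pvLayers, ih]

theorem pvLayers_front (k : Nat) : ∀ ps : List (Int × Int),
    pvLayers (k + 1) ps = pvLayers k (ps.flatMap pvStep) := by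
  induction k with
  | zero => intro ps; rfl
  | succ k ih =>
    intro ps
    show (pvLayers (k + 1) ps).flatMap pvStep = _
    rw [ih ps]
    rfl

theorem pvLayers_flatMap_singleton (k : Nat) (xs : List (Int × Int)) :
    pvLayers k xs = xs.flatMap (fun p => pvLayers k [p]) := by
  induction xs with
  | nil => simp [pvLayers_nil]
  | cons x xs ih =>
    have h : x :: xs = [x] ++ xs := rfl
    rw [h, pvLayers_append, ih]
    simp

-- B's foldl over range(n) is pvLayers (the inline lambda is definitionally pvStep).
theorem pvFoldl_eq_layers (k : Nat) (ps : List (Int × Int)) :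
    (List.range k).foldl
      (fun nums _ => nums.flatMap (fun p =>
        (PySem.List.pyRange (p.2 + 1) 10 1).map (fun d => (p.1 * 10 + d, d)))) ps
      = pvLayers k ps := by
  induction k with
  | zero => rfl
  | succ k ih => rw [List.range_succ, List.foldl_append, ih]; rfl

theorem pvFoldDigits_concat (vec : List Int) (i : Int) :
    pvFoldDigits (vec ++ [i]) = pvFoldDigits vec * 10 + i := by
  simp [pvFoldDigits, List.foldl_append]

theorem pvFilter_range (l : Int) (hl : 0 ≤ l) :
    (PySem.List.pyRange 1 10 1).filter (fun i => decide (l < i))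
      = PySem.List.pyRange (l + 1) 10 1 := by
  by_cases h9 : l ≤ 9
  · interval_cases l <;> decide
  · rw [PySem.List.pyRange_one_eq_nil (a := l + 1) (b := 10) (by omega),
        List.filter_eq_nil_iff]
    intro x hx
    have hm := (PySem.List.mem_pyRange_one).mp hx
    simp only [decide_eq_true_eq]
    omega

-- When n < 0, or the fuel runs out before n reaches 0, solve appends nothing.
theorem pvSolve_id (fuel : Nat) : ∀ (vec : List Int) (n : Int) (res : List Int),
    (n < 0 ∨ (fuel : Int) ≤ n) → pvSolve fuel vec n res = res := by
  induction fuel with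
  | zero => intro vec n res _; rfl
  | succ fuel ih =>
    intro vec n res h
    have hn : n ≠ 0 := by rcases h with h | h <;> [omega; (push_cast at h; omega)]
    simp only [pvSolve, if_neg hn]
    have hf : ∀ (acc : List Int) (i : Int), i ∈ PySem.List.pyRange 1 10 1 →
        (if vec.length = 0 ∨ i > vec.getLastD 0 then pvSolve fuel (vec ++ [i]) (n - 1) acc
         else acc) = (fun (acc : List Int) (_ : Int) => acc) acc i := by
      intro acc i _
      split_ifs with _
      · exact ih _ _ _ (by rcases h with h | h <;> [left; right] <;> push_cast at * <;> omega)
      · rfl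
    rw [PySem.List.foldl_congr_mem _ _ _ _ hf, PySem.List.foldl_ignore]

-- The heart: solve on (vec, n) appends exactly the values of the n-step expansion of
-- (value of vec, last digit of vec), in the same (depth-first = layer-lexicographic) order.
theorem pvSolve_eq (fuel : Nat) : ∀ (n : Int) (vec res : List Int),
    0 ≤ n → n < (fuel : Int) → 0 ≤ vec.getLastD 0 →
    pvSolve fuel vec n res
      = res ++ (pvLayers n.toNat [(pvFoldDigits vec, vec.getLastD 0)]).map Prod.fst := by
  induction fuel with
  | zero => intro n vec res h0 hf _; exact absurd hf (by push_cast; omega)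
  | succ fuel ih =>
    intro n vec res h0 hf hl
    by_cases hn : n = 0
    · subst hn; simp [pvSolve, pvLayers]
    · have h1 : 1 ≤ n := by omega
      have htn : n.toNat = (n - 1).toNat + 1 := by omega
      simp only [pvSolve, if_neg hn]
      have hcong : ∀ (acc : List Int) (i : Int), i ∈ PySem.List.pyRange 1 10 1 →
          (if vec.length = 0 ∨ i > vec.getLastD 0 then pvSolve fuel (vec ++ [i]) (n - 1) acc
           else acc)
          = (fun (acc : List Int) (i : Int) =>
              if vec.getLastD 0 < i then
                acc ++ (pvLayers (n - 1).toNat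
                  [(pvFoldDigits vec * 10 + i, i)]).map Prod.fst
              else acc) acc i := by
        intro acc i him
        show _ = if vec.getLastD 0 < i then
            acc ++ (pvLayers (n - 1).toNat
              [(pvFoldDigits vec * 10 + i, i)]).map Prod.fst
          else acc
        have hm := (PySem.List.mem_pyRange_one).mp him
        by_cases hc : vec.getLastD 0 < i
        · rw [if_pos (Or.inr hc), if_pos hc]
          have := ih (n - 1) (vec ++ [i]) acc (by omega) (by push_cast at hf ⊢; omega)
            (by rw [List.getLastD_concat]; omega)
          rw [this, List.getLastD_concat, pvFoldDigits_concat]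
        · rw [if_neg ?_, if_neg hc]
          intro hor
          rcases hor with hlen | hgt
          · have hnil : vec = [] := List.eq_nil_of_length_eq_zero hlen
            rw [hnil] at hc
            exact hc (by simpa using hm.1)
          · exact hc hgt
      rw [PySem.List.foldl_congr_mem _ _ _ _ hcong,
          PySem.List.foldl_ite_eq_foldl_filter,
          PySem.List.foldl_append_eq_flatMap,
          pvFilter_range _ hl]
      rw [htn, pvLayers_front, show ([(pvFoldDigits vec, vec.getLastD 0)] :
            List (Int × Int)).flatMap pvStep = pvStep (pvFoldDigits vec, vec.getLastD 0) by simp]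
      show _ = res ++ (pvLayers (n - 1).toNat
        ((PySem.List.pyRange (vec.getLastD 0 + 1) 10 1).map
          (fun d => (pvFoldDigits vec * 10 + d, d)))).map Prod.fst
      rw [pvLayers_flatMap_singleton _ ((PySem.List.pyRange (vec.getLastD 0 + 1) 10 1).map _)]
      simp [List.flatMap_map, List.map_flatMap]

-- ===== VERDICT (by name: the statement is the Claim_ definition above) =====
theorem increasingNumber_spec : Claim_equal_increasingNumber := by
  unfold Claim_equal_increasingNumber
  intro n _
  unfold Spec_increasingNumber
  by_cases h1 : n = 1
  · subst h1; rfl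
  · by_cases hlo : n < 0
    · show increasingNumber n = increasingNumber_alt n
      unfold increasingNumber increasingNumber_alt
      rw [if_neg h1, if_neg h1, if_pos (Or.inl hlo)]
      exact pvSolve_id 10 [] n [] (Or.inl hlo)
    · by_cases hhi : n > 9
      · show increasingNumber n = increasingNumber_alt n
        unfold increasingNumber increasingNumber_alt
        rw [if_neg h1, if_neg h1, if_pos (Or.inr hhi)]
        exact pvSolve_id 10 [] n [] (Or.inr (by push_cast; omega))
      · show increasingNumber n = increasingNumber_alt n
        unfold increasingNumber increasingNumber_alt
        rw [if_neg h1, if_neg h1, if_neg (by omega : ¬(n < 0 ∨ n > 9))]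
        rw [pvSolve_eq 10 n [] [] (by omega) (by push_cast; omega) (by simp)]
        rw [pvFoldl_eq_layers]
        rfl
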